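-- pv_equiv track=rewrite | github.com/mpierse/advent-of-code-2026 | day1/puzzle.py | turn_dial
-- ===== SOURCE A (Python) =====
-- def turn_dial(directions: str) -> int:
--     # Starting at a very high number to avoid negative numbers
--     current_position = 100_000_050
--     zero_count = 0
--     for direction in directions.split('\n'):
--         if not direction:  # Skip empty lines
--             continue
--
--         turn_start = current_position
--         count = int(direction[1:])
--         if 'L' in direction:
--             current_position -= count
--         elif 'R' in direction:
--             current_position += count
--         turn_end = current_position
--
--         # Count all multiples of 100 crossed during this turn
--         if turn_end > turn_start:
--             # Moving right: count multiples in (start, end]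
--             zero_count += turn_end // 100 - turn_start // 100
--         else:
--             # Moving left: count multiples in [end, start)
--             # Need to subtract 1 from start and end to catch ending on a
--             # multiple of 100
--             zero_count += (turn_start - 1) // 100 - (turn_end - 1) // 100
--
--     return zero_count
-- ===== SOURCE B (Python) =====
-- def turn_dial(directions: str) -> int:
--     # Unit-step simulation: walk the dial one notch at a time and count each
--     # landing on a multiple of 100 (departure point is never checked).
--     position = 50
--     zeros = 0
--     for line in directions.split('\n'):
--         if not line:
--             continue
--         n = int(line[1:])
--         delta = -n if 'L' in line else n if 'R' in line else 0
--         step = 1 if delta > 0 else -1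
--         for _ in range(abs(delta)):
--             position += step
--             if position % 100 == 0:
--                 zeros += 1
--     return zeros
-- ===== Notes on version B (the rewrite author's own statement) =====
-- stated objective: alternative
-- what changed: B replaces A's per-line closed-form floor-division arithmetic by a direct unit-step simulation: it moves the dial one notch at a time and increments the counter whenever the position lands on a multiple of 100, so no crossing formula appears at all.
import Mathlib
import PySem

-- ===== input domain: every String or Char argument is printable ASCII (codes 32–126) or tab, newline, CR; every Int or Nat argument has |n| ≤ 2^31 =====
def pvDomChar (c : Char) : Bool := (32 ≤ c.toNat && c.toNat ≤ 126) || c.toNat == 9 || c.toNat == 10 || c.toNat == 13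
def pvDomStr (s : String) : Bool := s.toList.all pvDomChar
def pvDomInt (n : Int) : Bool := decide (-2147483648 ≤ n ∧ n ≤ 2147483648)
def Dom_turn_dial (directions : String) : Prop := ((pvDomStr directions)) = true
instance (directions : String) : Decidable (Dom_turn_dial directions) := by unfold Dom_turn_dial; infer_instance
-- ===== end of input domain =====

-- B replaces A's per-line floor-division crossing formulas by a unit-step simulation of the
-- dial that counts every landing on a multiple of 100 (objective: alternative; B is slower,
-- O(total distance) instead of O(lines)).

-- ===== PORT A =====
-- one iteration of A's for-loop; state = (current_position, zero_count)
def turnStepA (st : Int × Int) (direction : List Char) : Int × Int :=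
  if direction = [] then st
  else
    let turn_start := st.1
    let count := (PySem.Int.ofChars? (PySem.List.slice direction (some 1) none)).getD 0
    let turn_end :=
      if PySem.Chars.isIn ['L'] direction then turn_start - count
      else if PySem.Chars.isIn ['R'] direction then turn_start + count
      else turn_start
    let inc :=
      if turn_start < turn_end then
        PySem.Int.floordiv turn_end 100 - PySem.Int.floordiv turn_start 100
      else
        PySem.Int.floordiv (turn_start - 1) 100 - PySem.Int.floordiv (turn_end - 1) 100
    (turn_end, st.2 + inc)

def turn_dial (directions : String) : Int :=
  ((PySem.Chars.splitOn directions.toList ['\n']).foldl turnStepA (100000050, 0)).2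

-- ===== PORT B =====
-- Source B's inner 'for _ in range(abs(delta))' loop: k unit steps of size u from pos;
-- returns (final position, number of steps that landed on a multiple of 100)
def simUnits : Nat → Int → Int → Int × Int
  | 0, _, pos => (pos, 0)
  | k + 1, u, pos =>
      let pos' := pos + u
      let r := simUnits k u pos'
      (r.1, (if PySem.Int.mod pos' 100 = 0 then 1 else 0) + r.2)

-- one iteration of B's outer loop; state = (position, zeros)
def turnStepB (st : Int × Int) (line : List Char) : Int × Int :=
  if line = [] then st
  else
    let n := (PySem.Int.ofChars? (PySem.List.slice line (some 1) none)).getD 0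
    let delta :=
      if PySem.Chars.isIn ['L'] line then -n
      else if PySem.Chars.isIn ['R'] line then n
      else 0
    let u : Int := if 0 < delta then 1 else -1
    let r := simUnits delta.natAbs u st.1
    (r.1, st.2 + r.2)

def turn_dial_alt (directions : String) : Int :=
  ((PySem.Chars.splitOn directions.toList ['\n']).foldl turnStepB (50, 0)).2

-- ===== PRECONDITION & SPEC =====
-- Pre_ excludes exactly the inputs where A raises ValueError: a nonempty line whose tail
-- does not parse as a Python int literal.
def Pre_turn_dial (directions : String) : Prop :=
  ∀ line ∈ PySem.Chars.splitOn directions.toList ['\n'],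
    line = [] ∨ (PySem.Int.ofChars? line.tail).isSome = true
instance (directions : String) : Decidable (Pre_turn_dial directions) := by
  unfold Pre_turn_dial; infer_instance

def pvWitness_turn_dial : String := "R51\nL2\n\nR100"

def Spec_turn_dial (directions : String) (out : Int) : Prop := out = turn_dial_alt directions
instance (directions : String) (out : Int) : Decidable (Spec_turn_dial directions out) := by
  unfold Spec_turn_dial; infer_instance

-- ===== CLAIM (what is proved, stated in full; the proofs are below) =====
def Claim_equal_turn_dial : Prop := ∀ (directions : String), Dom_turn_dial directions → Pre_turn_dial directions → Spec_turn_dial directions (turn_dial directions)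

-- ===== LEMMAS AND PROOFS =====

-- counting landings on multiples of 100 over k unit steps is a floor-division difference
lemma simUnits_up (k : Nat) (pos : Int) :
    simUnits k 1 pos = (pos + k, (pos + k) / 100 - pos / 100) := by
  induction k generalizing pos with
  | zero => simp [simUnits]
  | succ k ih =>
      simp only [simUnits, ih (pos + 1), PySem.Int.mod_eq_emod_of_pos (by norm_num : (0:Int) < 100),
        Prod.mk.injEq]
      constructor
      · push_cast; ring
      · split_ifs with h <;> · push_cast; omega

lemma simUnits_down (k : Nat) (pos : Int) :
    simUnits k (-1) pos = (pos - k, (pos - 1) / 100 - (pos - 1 - k) / 100) := by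
  induction k generalizing pos with
  | zero => simp [simUnits]
  | succ k ih =>
      simp only [simUnits, ih (pos + (-1)), PySem.Int.mod_eq_emod_of_pos (by norm_num : (0:Int) < 100),
        Prod.mk.injEq]
      constructor
      · push_cast; ring
      · split_ifs with h <;> · push_cast; omega

-- one step of B from a position 100000000 below A's yields the same zero count
lemma turnStep_sim (line : List Char) (pos z : Int) :
    turnStepB (pos - 100000000, z) line
      = ((turnStepA (pos, z) line).1 - 100000000, (turnStepA (pos, z) line).2) := by
  by_cases hnil : line = []
  · simp [turnStepA, turnStepB, hnil]
  · simp only [turnStepA, turnStepB, hnil, if_false]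
    set c := (PySem.Int.ofChars? (PySem.List.slice line (some 1) none)).getD 0 with hc
    rw [PySem.Int.floordiv_eq_ediv_of_pos (by norm_num),
        PySem.Int.floordiv_eq_ediv_of_pos (by norm_num),
        PySem.Int.floordiv_eq_ediv_of_pos (by norm_num),
        PySem.Int.floordiv_eq_ediv_of_pos (by norm_num)]
    set d : Int :=
      if PySem.Chars.isIn ['L'] line then -c
      else if PySem.Chars.isIn ['R'] line then c
      else 0 with hd
    have hend :
        (if PySem.Chars.isIn ['L'] line then pos - c
         else if PySem.Chars.isIn ['R'] line then pos + c
         else pos) = pos + d := by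
      rw [hd]; split_ifs <;> ring
    rw [hend]
    by_cases hpos : 0 < d
    · have : d.natAbs = d.toNat := by omega
      rw [this, if_pos hpos, simUnits_up]
      have h1 : ((d.toNat : Int)) = d := by omega
      rw [h1, if_pos (by omega : pos < pos + d)]
      simp only [Prod.mk.injEq]
      constructor <;> omega
    · rw [if_neg hpos, simUnits_down]
      have h1 : ((d.natAbs : Int)) = -d := by omega
      rw [h1, if_neg (by omega : ¬ pos < pos + d)]
      simp only [Prod.mk.injEq]
      constructor <;> omega

-- the whole loops stay in simulation
lemma loop_sim (lines : List (List Char)) (pos z : Int) :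
    lines.foldl turnStepB (pos - 100000000, z)
      = ((lines.foldl turnStepA (pos, z)).1 - 100000000,
         (lines.foldl turnStepA (pos, z)).2) := by
  induction lines generalizing pos z with
  | nil => simp
  | cons l ls ih =>
      simp only [List.foldl_cons, turnStep_sim l pos z]
      rcases h : turnStepA (pos, z) l with ⟨pos', z'⟩
      rw [ih pos' z']

-- ===== VERDICT (by name: the statement is the Claim_ definition above) =====
theorem turn_dial_spec : Claim_equal_turn_dial := by
  intro directions _ _
  unfold Spec_turn_dial turn_dial turn_dial_alt
  have h50 : ((50 : Int), (0 : Int)) = ((100000050 : Int) - 100000000, 0) := by norm_num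
  rw [h50, loop_sim]
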